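-- pv_equiv track=rewrite | github.com/adampehrson/Kattis | venv/bin/Math_Homework.py | not_recursive
-- ===== SOURCE A (Python) =====
-- def not_recursive(animals, total):
--     possible = []
--     i = 0
--     while animals[0]*i <= total:
--         e = 0
--         while animals[1]*e <= total:
--             w = 0
--             while animals[2]*w <= total:
--                 if animals[0]*i + animals[1]*e + animals[2]*w == total:
--                     possible.append("{} {} {}".format(i, e, w))
--                 w += 1
--             e += 1
--         i += 1
--     return possible
-- ===== SOURCE B (Python) =====
-- def not_recursive(animals, total):
--     # O(n^2): for each (i, e) solve c*w = total - a*i - b*e directly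
--     possible = []
--     i = 0
--     while animals[0] * i <= total:
--         e = 0
--         while animals[1] * e <= total:
--             rem = total - animals[0] * i - animals[1] * e
--             if rem >= 0 and rem % animals[2] == 0:
--                 possible.append("{} {} {}".format(i, e, rem // animals[2]))
--             e += 1
--         i += 1
--     return possible
-- ===== Notes on version B (the rewrite author's own statement) =====
-- stated objective: alternative
-- what changed: The innermost brute-force loop over w is removed: for each (i, e) B solves c*w = total - a*i - b*e directly with a divisibility check and one integer division (intended as faster, O(n^2) vs O(n^3) in total/coefficient; a timing run could not confirm it, as both sides time out on the largest random totals).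
import Mathlib
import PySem

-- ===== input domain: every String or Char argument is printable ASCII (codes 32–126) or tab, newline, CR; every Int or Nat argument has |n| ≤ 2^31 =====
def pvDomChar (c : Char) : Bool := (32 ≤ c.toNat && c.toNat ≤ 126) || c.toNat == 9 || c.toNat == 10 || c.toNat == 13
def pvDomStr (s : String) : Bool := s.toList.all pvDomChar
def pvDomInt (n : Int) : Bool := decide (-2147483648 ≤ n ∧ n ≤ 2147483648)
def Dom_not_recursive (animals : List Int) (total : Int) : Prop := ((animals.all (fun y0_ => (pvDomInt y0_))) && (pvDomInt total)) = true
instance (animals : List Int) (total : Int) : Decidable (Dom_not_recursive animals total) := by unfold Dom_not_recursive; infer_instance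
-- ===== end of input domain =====

-- B removes A's innermost loop, solving c*w = total - a*i - b*e by a divisibility check and one division.
-- Pre_ excludes only inputs where A raises (IndexError) or diverges (nonpositive coefficient with total >= 0).


-- "{} {} {}".format(i, e, w)
def pvFmt3 (i e w : Int) : String :=
  PySem.Int.toStr i ++ " " ++ PySem.Int.toStr e ++ " " ++ PySem.Int.toStr w

-- ===== PORT A =====
-- inner 'while animals[2]*w <= total' loop; fuel bounds the iteration count (sufficient on Pre_)
def pvWLoopA (a0 a1 a2 total i e : Int) (w : Int) (acc : List String) : Nat → List String
  | 0 => acc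
  | f+1 =>
    if a2 * w ≤ total then
      pvWLoopA a0 a1 a2 total i e (w+1)
        (if a0*i + a1*e + a2*w = total then acc ++ [pvFmt3 i e w] else acc) f
    else acc

-- middle 'while animals[1]*e <= total' loop
def pvELoopA (a0 a1 a2 total i : Int) (e : Int) (acc : List String) (fw : Nat) : Nat → List String
  | 0 => acc
  | f+1 =>
    if a1 * e ≤ total then
      pvELoopA a0 a1 a2 total i (e+1) (pvWLoopA a0 a1 a2 total i e 0 acc fw) fw f
    else acc

-- outer 'while animals[0]*i <= total' loop
def pvILoopA (a0 a1 a2 total : Int) (i : Int) (acc : List String) (fw : Nat) : Nat → List String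
  | 0 => acc
  | f+1 =>
    if a0 * i ≤ total then
      pvILoopA a0 a1 a2 total (i+1) (pvELoopA a0 a1 a2 total i 0 acc fw fw) fw f
    else acc

def not_recursive (animals : List Int) (total : Int) : List String :=
  pvILoopA (animals.getD 0 0) (animals.getD 1 0) (animals.getD 2 0) total 0 []
    (total + 1).toNat (total + 1).toNat

-- ===== PORT B =====
-- B's inner body: rem = total - a*i - b*e; append iff rem >= 0 and rem % c == 0
def pvELoopB (a0 a1 a2 total i : Int) (e : Int) (acc : List String) : Nat → List String
  | 0 => acc
  | f+1 =>
    if a1 * e ≤ total then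
      pvELoopB a0 a1 a2 total i (e+1)
        (if 0 ≤ total - a0*i - a1*e ∧ PySem.Int.mod (total - a0*i - a1*e) a2 = 0 then
           acc ++ [pvFmt3 i e (PySem.Int.floordiv (total - a0*i - a1*e) a2)]
         else acc) f
    else acc

def pvILoopB (a0 a1 a2 total : Int) (i : Int) (acc : List String) : Nat → List String
  | 0 => acc
  | f+1 =>
    if a0 * i ≤ total then
      pvILoopB a0 a1 a2 total (i+1) (pvELoopB a0 a1 a2 total i 0 acc (total + 1).toNat) f
    else acc

def not_recursive_alt (animals : List Int) (total : Int) : List String :=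
  pvILoopB (animals.getD 0 0) (animals.getD 1 0) (animals.getD 2 0) total 0 []
    (total + 1).toNat

-- ===== PRECONDITION & SPEC =====
-- Pre_ excludes exactly the inputs where A raises an IndexError (animals too short for an access
-- that is reached) or loops forever (total >= 0 with a nonpositive coefficient among the first three).
def Pre_not_recursive (animals : List Int) (total : Int) : Prop :=
  animals ≠ [] ∧ (total < 0 ∨
    (2 < animals.length ∧ 0 < animals.getD 0 0 ∧ 0 < animals.getD 1 0 ∧ 0 < animals.getD 2 0))
instance (animals : List Int) (total : Int) : Decidable (Pre_not_recursive animals total) := by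
  unfold Pre_not_recursive; infer_instance

def pvWitness_not_recursive : List Int × Int := ([1, 2, 3], 5)

def Spec_not_recursive (animals : List Int) (total : Int) (out : List String) : Prop := out = not_recursive_alt animals total
instance (animals : List Int) (total : Int) (out : List String) : Decidable (Spec_not_recursive animals total out) := by unfold Spec_not_recursive; infer_instance

-- ===== CLAIM (what is proved, stated in full; the proofs are below) =====
def Claim_equal_not_recursive : Prop := ∀ (animals : List Int) (total : Int), Dom_not_recursive animals total → Pre_not_recursive animals total → Spec_not_recursive animals total (not_recursive animals total)

-- ===== LEMMAS AND PROOFS =====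

-- A's innermost loop, started at w with enough fuel, appends exactly the (unique) solution of
-- a2*w' = total - a0*i - a1*e with w' ≥ w, if any.
theorem pvWLoopA_eq (a0 a1 a2 total i e : Int) (ha2 : 0 < a2) (hs : 0 ≤ a0*i + a1*e) :
    ∀ (f : Nat) (w : Int) (acc : List String), total < a2 * (w + f) →
      pvWLoopA a0 a1 a2 total i e w acc f =
        if a2 ∣ (total - a0*i - a1*e) ∧ a2 * w ≤ total - a0*i - a1*e then
          acc ++ [pvFmt3 i e (PySem.Int.floordiv (total - a0*i - a1*e) a2)]
        else acc := by
  intro f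
  induction f with
  | zero =>
    intro w acc hf
    simp only [pvWLoopA]
    push_cast at hf
    rw [if_neg]
    rintro ⟨-, hle⟩
    nlinarith
  | succ f ih =>
    intro w acc hf
    simp only [pvWLoopA]
    by_cases hc : a2 * w ≤ total
    · rw [if_pos hc]
      by_cases heq : a0*i + a1*e + a2*w = total
      · rw [if_pos heq]
        rw [ih (w+1) (acc ++ [pvFmt3 i e w])
              (by rw [show w + 1 + (f:Int) = w + ((f:Int)+1) by ring]; push_cast at hf; exact hf)]
        rw [if_neg (by rintro ⟨-, hle⟩; nlinarith)]
        rw [if_pos ⟨⟨w, by linarith⟩, by linarith⟩]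
        have : total - a0*i - a1*e = a2 * w := by linarith
        rw [this, PySem.Int.floordiv_eq_ediv_of_pos ha2,
            Int.mul_ediv_cancel_left w (ne_of_gt ha2)]
      · rw [if_neg heq]
        rw [ih (w+1) acc
              (by rw [show w + 1 + (f:Int) = w + ((f:Int)+1) by ring]; push_cast at hf; exact hf)]
        by_cases hd : a2 ∣ (total - a0*i - a1*e)
        · obtain ⟨k, hk⟩ := hd
          by_cases h1 : a2 * (w+1) ≤ total - a0*i - a1*e
          · rw [if_pos ⟨⟨k, hk⟩, h1⟩, if_pos ⟨⟨k, hk⟩, by linarith⟩]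
          · rw [if_neg (by rintro ⟨-, h⟩; exact h1 h)]
            rw [if_neg]
            rintro ⟨-, h2⟩
            -- a2*w ≤ a2*k < a2*(w+1) forces k = w, contradicting heq
            have hwk' : a2 * w ≤ a2 * k := by rw [← hk]; exact h2
            have hkw' : a2 * k < a2 * (w + 1) := by rw [← hk]; exact not_le.mp h1
            have hwk : w ≤ k := le_of_mul_le_mul_left hwk' ha2
            have hkw : k < w + 1 := lt_of_mul_lt_mul_left hkw' (le_of_lt ha2)
            have hkw2 : k = w := by omega
            rw [hkw2] at hk
            exact heq (by linarith)
        · rw [if_neg (by rintro ⟨h, -⟩; exact hd h),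
              if_neg (by rintro ⟨h, -⟩; exact hd h)]
    · rw [if_neg hc, if_neg]
      rintro ⟨-, hle⟩
      linarith
-- middle loops agree (A's inner loop collapses to B's divisibility test)
theorem pvELoop_eq (a0 a1 a2 total i : Int) (h0 : 0 < a0) (h1 : 0 < a1) (h2 : 0 < a2)
    (hi : 0 ≤ i) (ht : 0 ≤ total) :
    ∀ (f : Nat) (e : Int) (acc : List String), 0 ≤ e →
      pvELoopA a0 a1 a2 total i e acc (total + 1).toNat f =
      pvELoopB a0 a1 a2 total i e acc f := by
  intro f
  induction f with
  | zero => intro e acc _; rfl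
  | succ f ih =>
    intro e acc he
    simp only [pvELoopA, pvELoopB]
    by_cases hc : a1 * e ≤ total
    · rw [if_pos hc, if_pos hc]
      have hfw : total < a2 * ((0:Int) + ((total + 1).toNat : Int)) := by
        have : ((total + 1).toNat : Int) = total + 1 := by omega
        rw [this]; nlinarith
      rw [pvWLoopA_eq a0 a1 a2 total i e h2
            (by positivity) ((total+1).toNat) 0 acc hfw]
      have hcond : (a2 ∣ (total - a0*i - a1*e) ∧ a2 * 0 ≤ total - a0*i - a1*e) ↔
          (0 ≤ total - a0*i - a1*e ∧ PySem.Int.mod (total - a0*i - a1*e) a2 = 0) := by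
        rw [PySem.Int.mod_eq_zero_iff_dvd]
        constructor
        · rintro ⟨hd, hle⟩; exact ⟨by linarith, hd⟩
        · rintro ⟨hle, hd⟩; exact ⟨hd, by linarith⟩
      rw [if_congr hcond rfl rfl]
      exact ih (e+1) _ (by linarith)
    · rw [if_neg hc, if_neg hc]
-- outer loops agree
theorem pvILoop_eq (a0 a1 a2 total : Int) (h0 : 0 < a0) (h1 : 0 < a1) (h2 : 0 < a2)
    (ht : 0 ≤ total) :
    ∀ (f : Nat) (i : Int) (acc : List String), 0 ≤ i →
      pvILoopA a0 a1 a2 total i acc (total + 1).toNat f =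
      pvILoopB a0 a1 a2 total i acc f := by
  intro f
  induction f with
  | zero => intro i acc _; rfl
  | succ f ih =>
    intro i acc hi
    simp only [pvILoopA, pvILoopB]
    by_cases hc : a0 * i ≤ total
    · rw [if_pos hc, if_pos hc,
          pvELoop_eq a0 a1 a2 total i h0 h1 h2 hi ht ((total+1).toNat) 0 acc le_rfl]
      exact ih (i+1) _ (by linarith)
    · rw [if_neg hc, if_neg hc]

-- ===== VERDICT (by name: the statement is the Claim_ definition above) =====
theorem not_recursive_spec : Claim_equal_not_recursive := by
  intro animals total _hdom hpre
  unfold Spec_not_recursive not_recursive not_recursive_alt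
  by_cases ht : total < 0
  · have h0 : (total + 1).toNat = 0 := by omega
    rw [h0]; rfl
  · have ht' : 0 ≤ total := not_lt.mp ht
    obtain ⟨hne, hca⟩ := hpre
    rcases hca with h | ⟨hlen, h0, h1, h2⟩
    · omega
    · exact pvILoop_eq _ _ _ total h0 h1 h2 ht' (total+1).toNat 0 [] le_rfl
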